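-- pv_equiv track=rewrite | github.com/stroblme/hqsp-stqft | qft.py | get_fft_from_counts
-- ===== SOURCE A (Python) =====
-- def get_bit_string(n, n_qubits):
--     """Returns the binary string of an integer with n_qubits characters
--
--     Args:
--         n (int): integer to be converted
--         n_qubits (int): number of qubits
--
--     Returns:
--         string: binary string
--     """
--
--     assert n < 2**n_qubits, 'n too big to binarise, increase n_qubits or decrease n'
--
--     bs = "{0:b}".format(n)
--     bs = "0"*(n_qubits - len(bs)) + bs
--
--     return bs
--
-- def get_fft_from_counts(counts, n_qubits):
--     """Calculates the fft based on the counts of an experiment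
--
--     Args:
--         counts (int): dictionary with binary keys
--         n_qubits (int): number of qubits
--
--     Returns:
--         dict: fft counts
--     """
--     out = []
--     keys = counts.keys()
--     for i in range(2**n_qubits):
--         id = get_bit_string(i, n_qubits)
--         if(id in keys):
--             out.append(counts[id])
--         else:
--             out.append(0)
--
--     return out
-- ===== SOURCE B (Python) =====
-- def get_fft_from_counts(counts, n_qubits):
--     """Calculates the fft based on the counts of an experiment.
--
--     Generates all n_qubits-bit keys in numeric order by repeated bit
--     extension and reads each one's count straight from the dict.
--     """
--     keys = [""]
--     for _ in range(n_qubits):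
--         keys = [k + b for k in keys for b in "01"]
--     return [counts.get(k, 0) for k in keys]
-- ===== Notes on version B (the rewrite author's own statement) =====
-- stated objective: alternative
-- what changed: Instead of formatting every index 0..2**n_qubits-1 into a zero-padded bit string via a helper and testing membership before lookup, B builds the complete list of n_qubits-bit keys by repeated one-bit extension and maps dict.get over it; Pre_ excludes n_qubits < 0 (A raises TypeError there) and the degenerate n_qubits = 0, where A's single one-character key "0" is an artefact of "{0:b}".format(0) and B's empty key is equally defensible.
-- outside the precondition, e.g. on get_fft_from_counts({'0': 5}, 0): A returns [5], B returns [0]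
import Mathlib
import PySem

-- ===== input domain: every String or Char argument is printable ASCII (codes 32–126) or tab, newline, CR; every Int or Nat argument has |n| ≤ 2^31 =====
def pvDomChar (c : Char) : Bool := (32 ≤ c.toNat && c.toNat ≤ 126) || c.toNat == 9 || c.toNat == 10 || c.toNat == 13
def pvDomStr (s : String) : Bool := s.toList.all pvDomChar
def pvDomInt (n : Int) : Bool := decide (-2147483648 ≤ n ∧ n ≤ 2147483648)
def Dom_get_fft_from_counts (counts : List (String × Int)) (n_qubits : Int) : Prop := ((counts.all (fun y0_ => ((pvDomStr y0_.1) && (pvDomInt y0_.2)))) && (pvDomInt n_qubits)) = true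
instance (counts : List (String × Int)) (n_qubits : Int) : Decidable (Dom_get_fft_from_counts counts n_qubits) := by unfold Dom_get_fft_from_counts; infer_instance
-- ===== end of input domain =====

-- B generates all n_qubits-bit keys in numeric order by repeated bit extension and reads
-- each one's count from the dict, instead of formatting every index as a padded bit string.

-- ===== PORT A =====
-- "{0:b}".format(m) for m > 0, as a list of chars (most significant bit first)
def pvBits : Nat → List Char
  | 0 => []
  | m + 1 => pvBits ((m + 1) / 2) ++ [if (m + 1) % 2 = 1 then '1' else '0']
decreasing_by omega

-- exact for the nonnegative n that A passes in (A's assert always holds there)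
def get_bit_string (n n_qubits : Int) : String :=
  let bs : List Char := if n.toNat = 0 then ['0'] else pvBits n.toNat
  String.ofList (List.replicate (n_qubits - (bs.length : Int)).toNat '0' ++ bs)

def get_fft_from_counts (counts : List (String × Int)) (n_qubits : Int) : List Int :=
  let d := PySem.Dict.mk counts
  (PySem.List.pyRange 0 ((2 ^ n_qubits.toNat : Nat) : Int) 1).foldl
    (fun out i =>
      let id := get_bit_string i n_qubits
      if d.contains id then out ++ [d.getD id 0] else out ++ [(0 : Int)]) []

-- ===== PORT B =====
def get_fft_from_counts_alt (counts : List (String × Int)) (n_qubits : Int) : List Int :=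
  let keys := (PySem.List.pyRange 0 n_qubits 1).foldl
    (fun ks _ => ks.flatMap (fun k => "01".toList.map (fun b => k ++ String.singleton b)))
    [""]
  keys.map (fun k => (PySem.Dict.mk counts).getD k 0)

-- ===== PRECONDITION & SPEC =====
-- Pre_ excludes n_qubits < 0, where A raises TypeError (2**n_qubits is a float there), and
-- the degenerate corner n_qubits = 0, where A's single lookup key "0" (one character for
-- zero qubits, an artefact of "{0:b}".format(0)) and B's empty key are equally defensible.
def Pre_get_fft_from_counts (_counts : List (String × Int)) (n_qubits : Int) : Prop :=
  1 ≤ n_qubits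
instance (counts : List (String × Int)) (n_qubits : Int) : Decidable (Pre_get_fft_from_counts counts n_qubits) := by unfold Pre_get_fft_from_counts; infer_instance

def pvWitness_get_fft_from_counts : (List (String × Int)) × Int := ([("01", 3), ("ab", 1)], 2)

def Spec_get_fft_from_counts (counts : List (String × Int)) (n_qubits : Int) (out : List Int) : Prop := out = get_fft_from_counts_alt counts n_qubits
instance (counts : List (String × Int)) (n_qubits : Int) (out : List Int) : Decidable (Spec_get_fft_from_counts counts n_qubits out) := by unfold Spec_get_fft_from_counts; infer_instance

-- ===== CLAIM (what is proved, stated in full; the proofs are below) =====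
def Claim_equal_get_fft_from_counts : Prop := ∀ (counts : List (String × Int)) (n_qubits : Int), Dom_get_fft_from_counts counts n_qubits → Pre_get_fft_from_counts counts n_qubits → Spec_get_fft_from_counts counts n_qubits (get_fft_from_counts counts n_qubits)

-- ===== LEMMAS AND PROOFS =====

def pvDec (l : List Char) : Nat := l.foldl (fun a c => 2 * a + (if c = '1' then 1 else 0)) 0

lemma pvDec_from (l : List Char) (a : Nat) :
    l.foldl (fun a c => 2 * a + (if c = '1' then 1 else 0)) a = a * 2 ^ l.length + pvDec l := by
  induction l generalizing a with
  | nil => simp [pvDec]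
  | cons c t ih =>
    simp only [List.foldl_cons, List.length_cons, pvDec]
    rw [ih, ih (2 * 0 + if c = '1' then 1 else 0)]
    ring

lemma pvDec_cons (c : Char) (t : List Char) :
    pvDec (c :: t) = (if c = '1' then 1 else 0) * 2 ^ t.length + pvDec t := by
  have := pvDec_from t (2 * 0 + if c = '1' then 1 else 0)
  simpa [pvDec] using this

lemma pvDec_lt (l : List Char) : pvDec l < 2 ^ l.length := by
  induction l with
  | nil => simp [pvDec]
  | cons c t ih =>
    rw [pvDec_cons]
    have : (if c = '1' then 1 else 0) ≤ 1 := by split <;> omega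
    have h2 : (2:Nat) ^ (c :: t).length = 2 * 2 ^ t.length := by rw [List.length_cons, pow_succ]; ring
    rw [h2]; nlinarith [ih]

lemma pvDec_append_singleton (l : List Char) (c : Char) :
    pvDec (l ++ [c]) = 2 * pvDec l + (if c = '1' then 1 else 0) := by
  simp [pvDec, List.foldl_append]

lemma pvDec_replicate_zero (p : Nat) (l : List Char) :
    pvDec (List.replicate p '0' ++ l) = pvDec l := by
  induction p with
  | zero => simp
  | succ q ih => simpa [List.replicate_succ, pvDec, List.foldl_cons] using ih

def pvBinary (l : List Char) : Bool := l.all (fun c => c == '0' || c == '1')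

lemma pvBits_dec (m : Nat) : pvDec (pvBits m) = m := by
  fun_induction pvBits m with
  | case1 => simp [pvDec]
  | case2 m ih =>
    rw [pvDec_append_singleton, ih]
    rcases Nat.mod_two_eq_zero_or_one (m + 1) with h | h <;> simp [h] <;> omega

lemma pvBits_binary (m : Nat) : pvBinary (pvBits m) = true := by
  fun_induction pvBits m with
  | case1 => simp [pvBinary]
  | case2 m ih =>
    simp only [pvBinary, List.all_append] at *
    simp [ih]
    omega

lemma pvBits_len (m n : Nat) (h : m < 2 ^ n) : (pvBits m).length ≤ n := by
  induction n generalizing m with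
  | zero => interval_cases m; simp [pvBits]
  | succ n ih =>
    cases m with
    | zero => simp [pvBits]
    | succ k =>
      rw [pvBits, List.length_append]
      have : (k + 1) / 2 < 2 ^ n := by
        have : (2:Nat) ^ (n+1) = 2 * 2 ^ n := by rw [pow_succ]; ring
        omega
      have := ih _ this
      simp; omega

lemma pvBits_len_pos (m : Nat) (h : 0 < m) : 1 ≤ (pvBits m).length := by
  cases m with
  | zero => omega
  | succ k => rw [pvBits]; simp

def pvEnc (i : Nat) (n_qubits : Int) : List Char := (get_bit_string (i : Int) n_qubits).toList

lemma pvEnc_eq (i : Nat) (nq : Int) :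
    pvEnc i nq = List.replicate (nq - (((if i = 0 then ['0'] else pvBits i) : List Char).length : Int)).toNat '0'
      ++ (if i = 0 then ['0'] else pvBits i) := by
  simp [pvEnc, get_bit_string]

lemma pvEnc_len (i : Nat) (nq : Int) (h0 : 0 ≤ nq) (hi : i < 2 ^ nq.toNat) :
    (pvEnc i nq).length = max nq.toNat 1 := by
  rw [pvEnc_eq, List.length_append, List.length_replicate]
  by_cases h : i = 0
  · simp only [h]
    norm_num
    omega
  · rw [if_neg h]
    have h1 : 1 ≤ (pvBits i).length := pvBits_len_pos i (by omega)
    have h2 : (pvBits i).length ≤ nq.toNat := pvBits_len i nq.toNat hi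
    omega

lemma pvEnc_binary (i : Nat) (nq : Int) : pvBinary (pvEnc i nq) = true := by
  rw [pvEnc_eq]
  simp only [pvBinary, List.all_append, List.all_replicate]
  have := pvBits_binary i
  by_cases h : i = 0 <;> simp_all [pvBinary]

lemma pvEnc_dec (i : Nat) (nq : Int) : pvDec (pvEnc i nq) = i := by
  rw [pvEnc_eq, pvDec_replicate_zero]
  by_cases h : i = 0
  · simp [h, pvDec]
  · rw [if_neg h]; exact pvBits_dec i

lemma pvDec_inj (l1 l2 : List Char) (hlen : l1.length = l2.length)
    (h1 : pvBinary l1 = true) (h2 : pvBinary l2 = true) (h : pvDec l1 = pvDec l2) : l1 = l2 := by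
  induction l1 generalizing l2 with
  | nil => cases l2 with
    | nil => rfl
    | cons c t => simp at hlen
  | cons c1 t1 ih =>
    cases l2 with
    | nil => simp at hlen
    | cons c2 t2 =>
      simp only [List.length_cons] at hlen
      simp only [pvBinary, List.all_cons, Bool.and_eq_true, beq_iff_eq, Bool.or_eq_true] at h1 h2
      have hlen' : t1.length = t2.length := by omega
      rw [pvDec_cons, pvDec_cons, hlen'] at h
      have d1 := pvDec_lt t1
      have d2 := pvDec_lt t2
      rw [hlen'] at d1
      have hb : c1 = c2 ∧ pvDec t1 = pvDec t2 := by
        rcases h1.1 with e1 | e1 <;> rcases h2.1 with e2 | e2 <;> subst e1 <;> subst e2 <;>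
          [skip; skip; skip; skip] <;> (try simp at h) <;>
          first
            | exact ⟨rfl, by omega⟩
            | (exfalso; omega)
      rw [hb.1, ih t2 hlen' (by simpa [pvBinary] using h1.2) (by simpa [pvBinary] using h2.2) hb.2]

-- extending an n-bit encoding by one bit gives the (n+1)-bit encoding of 2i+bit
lemma pvEnc_extend (i : Nat) (n : Nat) (hn : 1 ≤ n) (hi : i < 2 ^ n) (b : Char)
    (hb : b = '0' ∨ b = '1') :
    pvEnc i (n : Int) ++ [b] = pvEnc (2 * i + (if b = '1' then 1 else 0)) ((n : Int) + 1) := by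
  have hbit : (if b = '1' then 1 else 0) ≤ 1 := by split <;> omega
  have hlt : 2 * i + (if b = '1' then 1 else 0) < 2 ^ (n + 1) := by
    rw [pow_succ]; omega
  apply pvDec_inj
  · rw [List.length_append, pvEnc_len i n (by positivity) (by simpa using hi)]
    have := pvEnc_len (2 * i + (if b = '1' then 1 else 0)) ((n : Int) + 1)
      (by positivity) (by rw [show ((n : Int) + 1).toNat = n + 1 by omega]; exact hlt)
    rw [this, show ((n : Int) + 1).toNat = n + 1 by omega]
    simp; omega
  · have h' := pvEnc_binary i (n : Int)
    simp only [pvBinary, List.all_append] at *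
    rcases hb with h | h <;> simp [h', h]
  · exact pvEnc_binary _ _
  · rw [pvDec_append_singleton, pvEnc_dec, pvEnc_dec]

-- doubling flatMap over a range is a map over the doubled range
lemma pvFlatMap_double {α : Type} (f : Nat → α) (m : Nat) :
    (List.range m).flatMap (fun i => [f (2 * i), f (2 * i + 1)]) = (List.range (2 * m)).map f := by
  induction m with
  | zero => simp
  | succ k ih =>
    rw [List.range_succ, show 2 * (k + 1) = 2 * k + 1 + 1 by ring, List.range_succ, List.range_succ]
    simp only [List.flatMap_append, ih]
    simp

-- one step of B's key extension, at the char-list level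
def pvCStep (ks : List (List Char)) : List (List Char) :=
  ks.flatMap (fun k => [k ++ ['0'], k ++ ['1']])

lemma pvCIter (n : Nat) (hn : 1 ≤ n) :
    pvCStep^[n] [[]] = (List.range (2 ^ n)).map (fun i => pvEnc i (n : Int)) := by
  induction n with
  | zero => omega
  | succ k ih =>
    by_cases hk : 1 ≤ k
    · rw [Function.iterate_succ_apply', ih hk, pvCStep, List.flatMap_map]
      have hcong : ∀ i ∈ List.range (2 ^ k),
          [pvEnc i (k : Int) ++ ['0'], pvEnc i (k : Int) ++ ['1']]
            = [pvEnc (2 * i) ((k : Int) + 1), pvEnc (2 * i + 1) ((k : Int) + 1)] := by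
        intro i hi
        rw [List.mem_range] at hi
        rw [pvEnc_extend i k hk hi '0' (Or.inl rfl), pvEnc_extend i k hk hi '1' (Or.inr rfl)]
        simp
      rw [List.flatMap_congr hcong]
      have := pvFlatMap_double (fun i => pvEnc i ((k : Int) + 1)) (2 ^ k)
      rw [this, show 2 * 2 ^ k = 2 ^ (k + 1) by rw [pow_succ]; ring]
      have hc : ((k : Int) + 1) = ((k + 1 : Nat) : Int) := by push_cast; ring
      simp only [hc]
    · have hk0 : k = 0 := by omega
      subst hk0
      have e0 : pvEnc 0 (1 : Int) = ['0'] := by rw [pvEnc_eq]; norm_num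
      have e1 : pvEnc 1 (1 : Int) = ['1'] := by
        rw [pvEnc_eq]; norm_num [pvBits]
      norm_num
      rw [show List.range 2 = [0, 1] from rfl]
      simp only [List.map_cons, List.map_nil]
      simp only [pvCStep, List.flatMap_cons, List.flatMap_nil,
        List.nil_append, List.append_nil]
      exact congrArg₂ (fun x y => [x, y]) e0.symm e1.symm

-- a fold that ignores the range elements is an iterate
lemma pvFoldl_iterate {α β : Type} (g : α → α) (l : List β) (init : α) :
    l.foldl (fun a _ => g a) init = g^[l.length] init := by
  induction l generalizing init with
  | nil => rfl
  | cons x t ih => rw [List.foldl_cons, ih, List.length_cons, Function.iterate_succ_apply]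

lemma pvOfList_snoc (l : List Char) (b : Char) :
    String.ofList l ++ String.singleton b = String.ofList (l ++ [b]) := by
  have h : (String.ofList l ++ String.singleton b).toList = l ++ [b] := by
    simp [String.singleton]
  calc String.ofList l ++ String.singleton b
      = String.ofList ((String.ofList l ++ String.singleton b).toList) :=
        String.ofList_toList.symm
    _ = String.ofList (l ++ [b]) := by rw [h]

-- string-level step of B's port equals the char-level step under String.ofList
lemma pvSStep_map (ks : List (List Char)) :
    (ks.map String.ofList).flatMap
        (fun k => "01".toList.map (fun b => k ++ String.singleton b))
      = (pvCStep ks).map String.ofList := by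
  rw [pvCStep, List.flatMap_map, List.map_flatMap]
  apply List.flatMap_congr
  intro k _
  rw [show "01".toList = ['0', '1'] from rfl]
  simp only [List.map_cons, List.map_nil]
  rw [pvOfList_snoc k '0', pvOfList_snoc k '1']

lemma pvSIter (n : Nat) :
    (fun ks : List String =>
        ks.flatMap (fun k => "01".toList.map (fun b => k ++ String.singleton b)))^[n] [""]
      = (pvCStep^[n] [[]]).map String.ofList := by
  induction n with
  | zero => rfl
  | succ k ih =>
    rw [Function.iterate_succ_apply', Function.iterate_succ_apply', ih, pvSStep_map]

lemma pvEnc_ofList (i : Nat) (nq : Int) : String.ofList (pvEnc i nq) = get_bit_string (i : Int) nq := by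
  rw [pvEnc, String.ofList_toList]

lemma pvA_eq (counts : List (String × Int)) (nq : Int) :
    get_fft_from_counts counts nq =
      (List.range (2 ^ nq.toNat)).map
        (fun (i : Nat) => (PySem.Dict.mk counts).getD (get_bit_string (i : Nat) nq) 0) := by
  simp only [get_fft_from_counts]
  have hbody : (fun (out : List Int) (i : Int) =>
        let id := get_bit_string i nq
        if (PySem.Dict.mk counts).contains id then
          out ++ [(PySem.Dict.mk counts).getD id 0] else out ++ [(0 : Int)])
      = (fun (out : List Int) (i : Int) =>
        out ++ [(PySem.Dict.mk counts).getD (get_bit_string i nq) 0]) := by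
    funext out i
    by_cases h : (PySem.Dict.mk counts).contains (get_bit_string i nq)
    · simp [h]
    · simp only [Bool.not_eq_true] at h
      have hnone : (PySem.Dict.mk counts).get? (get_bit_string i nq) = none := by
        rw [PySem.Dict.get?_eq_none_iff_contains]
        exact h
      simp [h, PySem.Dict.getD_eq_get?_getD, hnone]
  rw [hbody, PySem.List.foldl_append_singleton_eq_map, PySem.List.pyRange_one]
  have hNN : (((2 ^ nq.toNat : Nat) : Int) - 0).toNat = 2 ^ nq.toNat := by
    rw [sub_zero, Int.toNat_natCast]
  rw [hNN]
  simp only [List.map_map, Function.comp_def]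
  simp

lemma pvB_eq (counts : List (String × Int)) (nq : Int) (h1 : 1 ≤ nq) :
    get_fft_from_counts_alt counts nq =
      (List.range (2 ^ nq.toNat)).map
        (fun (i : Nat) => (PySem.Dict.mk counts).getD (get_bit_string (i : Nat) nq) 0) := by
  simp only [get_fft_from_counts_alt]
  rw [pvFoldl_iterate, PySem.List.length_pyRange_one, sub_zero, pvSIter,
    pvCIter nq.toNat (by omega)]
  simp only [List.map_map]
  apply List.map_congr_left
  intro i _
  simp only [Function.comp_apply]
  rw [show ((nq.toNat : Nat) : Int) = nq by omega, pvEnc_ofList]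

-- ===== VERDICT (by name: the statement is the Claim_ definition above) =====
theorem get_fft_from_counts_spec : Claim_equal_get_fft_from_counts := by
  intro counts nq _ hpre
  unfold Spec_get_fft_from_counts
  rw [pvA_eq counts nq, pvB_eq counts nq hpre]
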